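-- pv_equiv track=rewrite | github.com/castogio/advent-of-code-2023 | day13.py | find_symmetry_loc
-- ===== SOURCE A (Python) =====
-- Matrix = list[list[str]]
--
-- def find_symmetry_loc(m: Matrix, exlude: int = -1) -> int:
--     seen = [m[0]]
--     result = []
--     for i, row in enumerate(m[1:], start=1):
--         if seen[-1] == row:
--             remainder = m[i:i+len(seen)]
--             previus = m[max(0, i-len(remainder)):i]
--             if remainder == list(reversed(previus)):
--                 result.append(len(seen))
--         seen.append(row)
--
--     if len(result) == 0:
--         return -1
--
--     #  need to exclude already obtained result
--     # more specifically this happens if the simmetry line (with smudge)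
--     # is below the new line and it would be picked as the longest match
--     if exlude == result[-1]:
--         try:
--             return result[-2]
--         except:
--             return -1
--
--     return result[-1]
-- ===== SOURCE B (Python) =====
-- def find_symmetry_loc(m, exlude=-1):
--     # scan candidate mirror lines from the bottom up and return the first
--     # acceptable one; rows are compared element-wise, no slices are built
--     n = len(m)
--     for i in range(n - 1, 0, -1):
--         w = min(i, n - i)
--         if all(m[i - 1 - k] == m[i + k] for k in range(w)):
--             if i != exlude:
--                 return i
--     return -1
-- ===== Notes on version B (the rewrite author's own statement) =====
-- stated objective: faster
-- what changed: B scans candidate mirror lines from the bottom up with an early return and compares rows element-wise with short-circuiting, instead of A's ascending pass that materialises and reverses list slices at every matching adjacent pair, collects all matches and then post-processes the last/second-last entry.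
-- outside the precondition, e.g. on find_symmetry_loc([], -1): A raises IndexError, B returns -1
import Mathlib
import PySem

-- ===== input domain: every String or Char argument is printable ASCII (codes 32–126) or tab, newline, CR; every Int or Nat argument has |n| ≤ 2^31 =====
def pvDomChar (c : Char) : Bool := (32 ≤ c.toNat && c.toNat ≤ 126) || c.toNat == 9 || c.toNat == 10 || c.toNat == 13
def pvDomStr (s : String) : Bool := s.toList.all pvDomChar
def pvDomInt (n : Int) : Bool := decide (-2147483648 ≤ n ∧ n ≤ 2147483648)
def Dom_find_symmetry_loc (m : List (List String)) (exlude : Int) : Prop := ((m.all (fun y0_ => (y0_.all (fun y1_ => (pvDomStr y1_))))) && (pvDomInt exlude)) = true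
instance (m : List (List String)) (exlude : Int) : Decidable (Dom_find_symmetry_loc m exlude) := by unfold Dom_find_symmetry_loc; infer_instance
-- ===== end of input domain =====

-- B scans candidate mirror lines bottom-up with an early return and element-wise row
-- comparison, instead of A's ascending slice-and-reverse pass that collects all matches.

-- ===== PORT A =====
-- the loop body of A: state = (seen, result), item = (i, row)
def aStep (m : List (List String)) (st : List (List String) × List Int)
    (p : Int × List String) : List (List String) × List Int :=
  (st.1 ++ [p.2],
   if st.1.getLast? == some p.2 then
     let remainder := PySem.List.slice m (some p.1) (some (p.1 + (st.1.length : Int)))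
     let previus := PySem.List.slice m (some (max 0 (p.1 - (remainder.length : Int)))) (some p.1)
     if remainder == previus.reverse then st.2 ++ [(st.1.length : Int)] else st.2
   else st.2)

def find_symmetry_loc (m : List (List String)) (exlude : Int) : Int :=
  match m with
  | [] => -1  -- m[0] raises IndexError on empty m; excluded by Pre_
  | m0 :: _ =>
    let st := (PySem.List.enumerate (m.drop 1) 1).foldl (aStep m) ([m0], [])
    let result := st.2
    match result.getLast? with          -- len(result) == 0  /  result[-1]
    | none => -1
    | some last =>
      if exlude == last then
        match PySem.List.pyGet? result (-2) with  -- try result[-2] except: -1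
        | some v => v
        | none => -1
      else last

-- ===== PORT B =====
-- all(m[i-1-k] == m[i+k] for k in range(min(i, n-i)))
def altCheck (m : List (List String)) (i : Int) : Bool :=
  let w := min i ((m.length : Int) - i)
  (PySem.List.pyRange 0 w 1).all
    (fun k => PySem.List.pyGetD m (i - 1 - k) [] == PySem.List.pyGetD m (i + k) [])

-- the for-loop with its early return
def altFind (m : List (List String)) (exlude : Int) : List Int → Int
  | [] => -1
  | i :: rest => if altCheck m i && !(i == exlude) then i else altFind m exlude rest

def find_symmetry_loc_alt (m : List (List String)) (exlude : Int) : Int :=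
  altFind m exlude (PySem.List.pyRange ((m.length : Int) - 1) 0 (-1))

-- ===== PRECONDITION & SPEC =====
-- Pre_ excludes only the empty matrix, on which A raises IndexError (m[0]).
def Pre_find_symmetry_loc (m : List (List String)) (exlude : Int) : Prop := m ≠ []
instance (m : List (List String)) (exlude : Int) : Decidable (Pre_find_symmetry_loc m exlude) := by
  unfold Pre_find_symmetry_loc; infer_instance
def pvWitness_find_symmetry_loc : List (List String) × Int := ([["#"], ["#"]], -1)

def Spec_find_symmetry_loc (m : List (List String)) (exlude : Int) (out : Int) : Prop :=
  out = find_symmetry_loc_alt m exlude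
instance (m : List (List String)) (exlude : Int) (out : Int) : Decidable (Spec_find_symmetry_loc m exlude out) := by
  unfold Spec_find_symmetry_loc; infer_instance

-- ===== CLAIM (what is proved, stated in full; the proofs are below) =====
def Claim_equal_find_symmetry_loc : Prop := ∀ (m : List (List String)) (exlude : Int), Dom_find_symmetry_loc m exlude → Pre_find_symmetry_loc m exlude → Spec_find_symmetry_loc m exlude (find_symmetry_loc m exlude)

-- ===== LEMMAS AND PROOFS =====

-- the mirror condition at boundary s, as a Prop and as a Bool
def goodP (m : List (List String)) (s : Nat) : Prop :=
  ∀ k, k < min s (m.length - s) → m.getD (s + k) [] = m.getD (s - 1 - k) []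

def goodB (m : List (List String)) (s : Nat) : Bool :=
  (List.range (min s (m.length - s))).all
    (fun k => m.getD (s + k) [] == m.getD (s - 1 - k) [])

lemma goodB_true_iff (m : List (List String)) (s : Nat) : goodB m s = true ↔ goodP m s := by
  simp [goodB, goodP, List.all_eq_true, List.mem_range]

-- B's check agrees with the mirror condition
lemma altCheck_eq_goodB (m : List (List String)) (s : Nat) (hn : s < m.length) :
    altCheck m (s : Int) = goodB m s := by
  have hr : min (s : Int) ((m.length : Int) - s) = ((min s (m.length - s) : Nat) : Int) := by
    push_cast; omega
  have key : (altCheck m (s : Int) = true) ↔ goodP m s := by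
    simp only [altCheck, hr, List.all_eq_true]
    constructor
    · intro h k hk
      have hm := h (k : Int) (by rw [PySem.List.mem_pyRange_one]; constructor <;> omega)
      rw [show ((s : Int) - 1 - (k : Int)) = ((s - 1 - k : Nat) : Int) by omega,
          show ((s : Int) + (k : Int)) = ((s + k : Nat) : Int) by omega,
          PySem.List.pyGetD_natCast, PySem.List.pyGetD_natCast, beq_iff_eq] at hm
      exact hm.symm
    · intro h k hk
      rw [PySem.List.mem_pyRange_one] at hk
      obtain ⟨kN, rfl⟩ : ∃ kN : Nat, k = (kN : Int) := ⟨k.toNat, by omega⟩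
      have hkN : kN < min s (m.length - s) := by omega
      rw [show ((s : Int) - 1 - (kN : Int)) = ((s - 1 - kN : Nat) : Int) by omega,
          show ((s : Int) + (kN : Int)) = ((s + kN : Nat) : Int) by omega,
          PySem.List.pyGetD_natCast, PySem.List.pyGetD_natCast, beq_iff_eq]
      exact (h kN hkN).symm
  rcases hgb : goodB m s with _ | _
  · refine Bool.eq_false_iff.mpr (fun hc => ?_)
    have ht : goodB m s = true := (goodB_true_iff m s).mpr (key.mp hc)
    rw [hgb] at ht
    exact Bool.false_ne_true ht
  · exact key.mpr ((goodB_true_iff m s).mp hgb)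

-- A's loop body on the invariant state: guard + slice comparison = mirror condition
lemma aStep_eq (m : List (List String)) (s : Nat) (res : List Int)
    (hs : 1 ≤ s) (hn : s < m.length) :
    aStep m (m.take s, res) ((s : Int), m.getD s []) =
      (m.take (s + 1), if goodB m s then res ++ [(s : Int)] else res) := by
  have hlen : (m.take s).length = s := by simp; omega
  set r : Nat := min s (m.length - s) with hrdef
  have hr1 : 1 ≤ r := by omega
  have hrs : r ≤ s := by omega
  have hgetDs : m.getD s [] = m[s] := List.getD_eq_getElem m [] hn
  have hfst : m.take s ++ [m.getD s []] = m.take (s + 1) := by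
    rw [List.take_add_one, hgetDs]
    simp [List.getElem?_eq_getElem hn]
  have hrem : PySem.List.slice m (some (s : Int)) (some ((s : Int) + ((m.take s).length : Int)))
      = (m.drop s).take s := by
    rw [hlen, PySem.List.slice_natCast_add]
  have hremlen : ((m.drop s).take s).length = r := by simp; omega
  have hmax : max 0 ((s : Int) - (r : Int)) = ((s - r : Nat) : Int) := by omega
  have hprev : PySem.List.slice m (some (((s - r : Nat) : Int))) (some (s : Int))
      = (m.drop (s - r)).take r := by
    rw [PySem.List.slice_natCast]
    congr 1
    omega
  have hprevlen : ((m.drop (s - r)).take r).length = r := by simp; omega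
  have hguard : (m.take s).getLast? = some m[s - 1] := by
    rw [List.getLast?_eq_getElem?, hlen, List.getElem?_take_of_lt (by omega),
        List.getElem?_eq_getElem (by omega)]
  have hAk : ∀ k : Nat, ((m.drop s).take s)[k]? = if k < r then m[s + k]? else none := by
    intro k
    by_cases hk : k < r
    · rw [if_pos hk, List.getElem?_take_of_lt (by omega), List.getElem?_drop]
    · rw [if_neg hk, List.getElem?_eq_none_iff]
      omega
  have hBk : ∀ k : Nat, ((m.drop (s - r)).take r).reverse[k]? = if k < r then m[s - 1 - k]? else none := by
    intro k
    by_cases hk : k < r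
    · rw [if_pos hk, List.getElem?_reverse (by omega : k < ((m.drop (s - r)).take r).length),
          hprevlen, List.getElem?_take_of_lt (by omega), List.getElem?_drop,
          show s - r + (r - 1 - k) = s - 1 - k by omega]
    · rw [if_neg hk, List.getElem?_eq_none_iff]
      simp only [List.length_reverse]
      omega
  have hsl : ((m.drop s).take s = ((m.drop (s - r)).take r).reverse) ↔
      (∀ k, k < r → m.getD (s + k) [] = m.getD (s - 1 - k) []) := by
    constructor
    · intro h k hk
      have := congrArg (fun l => l[k]?) h
      simp only [hAk, hBk, if_pos hk] at this
      rw [List.getD_eq_getElem m [] (by omega : s + k < m.length),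
          List.getD_eq_getElem m [] (by omega : s - 1 - k < m.length)]
      rw [List.getElem?_eq_getElem (by omega : s + k < m.length),
          List.getElem?_eq_getElem (by omega : s - 1 - k < m.length)] at this
      exact Option.some.inj this
    · intro h
      apply List.ext_getElem?
      intro k
      rw [hAk, hBk]
      by_cases hk : k < r
      · rw [if_pos hk, if_pos hk,
            List.getElem?_eq_getElem (by omega : s + k < m.length),
            List.getElem?_eq_getElem (by omega : s - 1 - k < m.length)]
        have := h k hk
        rw [List.getD_eq_getElem m [] (by omega : s + k < m.length),
            List.getD_eq_getElem m [] (by omega : s - 1 - k < m.length)] at this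
        rw [this]
      · rw [if_neg hk, if_neg hk]
  have hgp : goodP m s ↔ (∀ k, k < r → m.getD (s + k) [] = m.getD (s - 1 - k) []) := Iff.rfl
  have hguard_of : (∀ k, k < r → m.getD (s + k) [] = m.getD (s - 1 - k) []) →
      m[s - 1] = m[s] := by
    intro h
    have := h 0 (by omega)
    rw [Nat.add_zero, Nat.sub_zero,
        List.getD_eq_getElem m [] hn, List.getD_eq_getElem m [] (by omega)] at this
    exact this.symm
  simp only [aStep]
  rw [Prod.mk.injEq]
  refine ⟨hfst, ?_⟩
  rw [hguard, hgetDs, hrem, hremlen, hmax, hprev, hlen]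
  by_cases hgood : goodP m s
  · have hpt := hgp.mp hgood
    have hgb : goodB m s = true := (goodB_true_iff m s).mpr hgood
    simp [hgb, hguard_of hpt, hsl.mpr hpt]
  · have hgb : goodB m s = false :=
      Bool.eq_false_iff.mpr (fun hc => hgood ((goodB_true_iff m s).mp hc))
    rw [hgb]
    by_cases hg : m[s - 1] = m[s]
    · have hns : ¬ (List.take s (List.drop s m) = (List.take r (List.drop (s - r) m)).reverse) :=
        fun hc => hgood (hgp.mpr (hsl.mp hc))
      simp [hg, hns]
    · simp [hg]

-- the fold invariant for A's loop
lemma foldA (m : List (List String)) (l : List (List String)) :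
    ∀ (s : Nat) (res : List Int), 1 ≤ s → m.drop s = l →
    (PySem.List.enumerate l (s : Int)).foldl (aStep m) (m.take s, res) =
      (m, res ++ ((List.range' s (m.length - s)).filter
        (fun i => goodB m i)).map (fun i : Nat => Int.ofNat i)) := by
  induction l with
  | nil =>
    intro s res hs hd
    have hls : m.length ≤ s := by
      have := congrArg List.length hd
      simp at this; omega
    rw [PySem.List.enumerate_nil, List.foldl_nil, List.take_of_length_le hls,
        show m.length - s = 0 by omega]
    simp
  | cons row l' ih =>
    intro s res hs hd
    have hlen := congrArg List.length hd
    simp at hlen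
    have hn : s < m.length := by omega
    have hrow : m.getD s [] = row := by
      have h0 : (m.drop s)[0]? = m[s + 0]? := List.getElem?_drop ..
      rw [List.getD_eq_getElem m [] hn]
      rw [hd] at h0
      simp [List.getElem?_eq_getElem hn] at h0
      simp [h0]
    have hd' : m.drop (s + 1) = l' := by
      have := congrArg List.tail hd
      simpa [List.tail_drop] using this
    rw [PySem.List.enumerate_cons, List.foldl_cons, ← hrow,
        aStep_eq m s res hs hn]
    rw [show ((s : Int) + 1) = ((s + 1 : Nat) : Int) by push_cast; ring,
        ih (s + 1) _ (by omega) hd']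
    have hnr : m.length - s = (m.length - (s + 1)) + 1 := by omega
    rw [hnr, List.range'_succ, List.filter_cons]
    by_cases hg : goodB m s
    · simp [hg]
    · simp [hg]

-- the selection A performs at the end, as a function of the result list
def aSelect (exlude : Int) (result : List Int) : Int :=
  match result.getLast? with
  | none => -1
  | some last =>
    if exlude == last then
      match PySem.List.pyGet? result (-2) with
      | some v => v
      | none => -1
    else last

-- the skeleton of B's loop once the check is factored out
def pick (exlude : Int) : List Int → Int
  | [] => -1
  | i :: rest => if !(i == exlude) then i else pick exlude rest

lemma altFind_eq_pick (m : List (List String)) (exlude : Int) (l : List Int) :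
    altFind m exlude l = pick exlude (l.filter (altCheck m)) := by
  induction l with
  | nil => rfl
  | cons i rest ih =>
    simp only [altFind, List.filter_cons]
    by_cases hc : altCheck m i
    · simp [hc, pick, ih]
    · simp [hc, ih]

lemma pyGet?_concat2 (ys : List Int) (h L : Int) :
    PySem.List.pyGet? (ys ++ [h, L]) (-2) = some h := by
  rw [PySem.List.pyGet?_neg_ofNat (ys ++ [h, L]) 2 (by omega) (by simp)]
  simp

-- A's final selection on a list equals B's first-hit scan on its reverse
lemma sel_pick (exlude : Int) (R : List Int) (hR : R.Pairwise (· > ·)) :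
    aSelect exlude R.reverse = pick exlude R := by
  cases R with
  | nil => rfl
  | cons L rest =>
    simp only [aSelect, List.reverse_cons, List.getLast?_append]
    by_cases hex : exlude = L
    · subst hex
      cases rest with
      | nil =>
        simp [pick, PySem.List.pyGet?, PySem.List.pyIdx?]
      | cons h t =>
        have hgt : exlude > h := (List.pairwise_cons.mp hR).1 h (by simp)
        rw [show (h :: t).reverse ++ [exlude] = t.reverse ++ [h, exlude] by simp,
            pyGet?_concat2]
        have hne : ¬ (h = exlude) := by omega
        simp [pick, hne]
    · simp [pick, hex, Ne.symm hex]

-- B as pick over the reversed filtered ascending candidate list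
lemma alt_as_pick (m : List (List String)) (exlude : Int) :
    find_symmetry_loc_alt m exlude =
      pick exlude ((((List.range' 1 (m.length - 1)).filter
        (fun i => goodB m i)).map (fun i : Nat => Int.ofNat i)).reverse) := by
  rw [find_symmetry_loc_alt, altFind_eq_pick]
  congr 1
  rw [PySem.List.pyRange_neg_one_eq_reverse,
      show ((m.length : Int) - 1 + 1) = ((m.length : Nat) : Int) by ring,
      show ((0 : Int) + 1) = 1 by ring,
      List.filter_reverse]
  congr 1
  have h1 : PySem.List.pyRange 1 ((m.length : Nat) : Int) 1 =
      (List.range' 1 (m.length - 1)).map (fun i : Nat => Int.ofNat i) := by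
    rw [PySem.List.pyRange_one, List.range'_eq_map_range, List.map_map]
    have ht : ((m.length : Int) - 1).toNat = m.length - 1 := by omega
    rw [ht]
    apply List.map_congr_left
    intro k _
    simp
  rw [h1, List.filter_map]
  have h2 : (List.range' 1 (m.length - 1)).filter (altCheck m ∘ fun i : Nat => Int.ofNat i) =
      (List.range' 1 (m.length - 1)).filter (fun i => goodB m i) := by
    apply List.filter_congr
    intro i hi
    rw [List.mem_range'_1] at hi
    simp only [Function.comp]
    exact altCheck_eq_goodB m i (by omega)
  rw [h2]

-- ===== VERDICT (by name: the statement is the Claim_ definition above) =====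
theorem find_symmetry_loc_spec : Claim_equal_find_symmetry_loc := by
  unfold Claim_equal_find_symmetry_loc
  intro m exlude _ hpre
  unfold Spec_find_symmetry_loc
  match m with
  | [] => exact absurd rfl hpre
  | m0 :: tl =>
    have hfold := foldA (m0 :: tl) ((m0 :: tl).drop 1) 1 [] (le_refl 1) rfl
    rw [show List.take 1 (m0 :: tl) = [m0] from rfl] at hfold
    have hA : find_symmetry_loc (m0 :: tl) exlude =
        aSelect exlude (((PySem.List.enumerate ((m0 :: tl).drop 1) ((1 : Nat) : Int)).foldl
          (aStep (m0 :: tl)) ([m0], [])).2) := rfl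
    rw [hA, hfold]
    show aSelect exlude ([] ++ _) = _
    rw [List.nil_append, alt_as_pick]
    set S : List Nat := (List.range' 1 ((m0 :: tl).length - 1)).filter
      (fun i => goodB (m0 :: tl) i) with hS
    have hp0 : (List.range' 1 ((m0 :: tl).length - 1)).Pairwise (· < ·) :=
      List.pairwise_lt_range' ..
    have hp1 : S.Pairwise (· < ·) := hp0.filter _
    have hp2 : (S.map (fun i : Nat => Int.ofNat i)).Pairwise (· < ·) :=
      List.Pairwise.map _ (fun a b h => by simpa using Int.ofNat_lt.mpr h) hp1
    have hpl : ((S.map (fun i : Nat => Int.ofNat i)).reverse).Pairwise (· > ·) := by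
      rw [List.pairwise_reverse]
      exact hp2
    have := sel_pick exlude ((S.map (fun i : Nat => Int.ofNat i)).reverse) hpl
    rw [List.reverse_reverse] at this
    exact this
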